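-- pv_equiv track=rewrite | github.com/Shab00/codingProblems | codfinity/numberPermutation.py | solve
-- ===== SOURCE A (Python) =====
-- def solve(nums: list[int]) -> list[int]:
--
--     lenNum = len(nums)
--     missing = []
--     result = []
--
--     for i in range(1, lenNum + 1):
--         if i not in nums:
--             missing.append(i)
--
--     if not missing:
--         return nums
--
--     used = set(result)
--
--     for j in nums:
--         if j not in used and j not in missing:
--             result.append(j)
--             used.add(j)
--         else:
--             smallest = min(missing)
--             result.append(smallest)
--             used.add(smallest)
--             missing.remove(smallest)
--
--
--     return result
-- ===== SOURCE B (Python) =====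
-- def solve(nums: list[int]) -> list[int]:
--     n = len(nums)
--     present = set(nums)
--     missing = [i for i in range(1, n + 1) if i not in present]
--     if not missing:
--         return nums
--     it = iter(missing)
--     seen = set()
--     result = []
--     for j in nums:
--         if j in seen:
--             result.append(next(it))
--         else:
--             result.append(j)
--             seen.add(j)
--     return result
-- ===== Notes on version B (the rewrite author's own statement) =====
-- stated objective: faster
-- what changed: Replaces A's per-element list scans (i not in nums for every i, plus min()+remove() on the missing list at each duplicate) by one set of the input, one ascending pass building the missing list, and an iterator consuming it in order, so the whole job is one O(n) pass instead of nested scans.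
import Mathlib
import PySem

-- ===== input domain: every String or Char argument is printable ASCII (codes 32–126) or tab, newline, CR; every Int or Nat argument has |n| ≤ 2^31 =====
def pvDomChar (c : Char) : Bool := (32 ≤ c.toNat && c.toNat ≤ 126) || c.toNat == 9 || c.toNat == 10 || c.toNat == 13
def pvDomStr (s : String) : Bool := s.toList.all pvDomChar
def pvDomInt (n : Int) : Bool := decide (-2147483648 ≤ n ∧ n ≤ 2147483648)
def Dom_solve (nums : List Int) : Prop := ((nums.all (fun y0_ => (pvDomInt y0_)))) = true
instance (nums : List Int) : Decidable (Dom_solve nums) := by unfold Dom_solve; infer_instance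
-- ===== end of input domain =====

-- B replaces A's quadratic membership scans and min()+remove() calls by a set plus one
-- ascending pass over the (already sorted) missing values; return values proved equal.

-- ===== PORT A =====
-- body of A's 'for j in nums' loop; state = (result, used, missing)
def solveStepA (st : List Int × PySem.Set Int × List Int) (j : Int) :
    List Int × PySem.Set Int × List Int :=
  let result := st.1
  let used := st.2.1
  let missing := st.2.2
  if j ∉ used ∧ j ∉ missing then
    (result ++ [j], PySem.Set.add used j, missing)
  else
    -- smallest = min(missing); A never reaches this with missing empty, the default 0 is unreachable
    let smallest := (PySem.List.min? missing (fun x => x)).getD 0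
    (result ++ [smallest], PySem.Set.add used smallest,
      (PySem.List.remove? missing smallest).getD missing)

def solve (nums : List Int) : List Int :=
  let lenNum : Int := nums.length
  let missing := (PySem.List.pyRange 1 (lenNum + 1) 1).foldl
      (fun acc i => if i ∉ nums then acc ++ [i] else acc) []
  if missing.isEmpty then nums
  else
    let used : PySem.Set Int := PySem.Set.ofList []
    (nums.foldl solveStepA ([], used, missing)).1

-- ===== PORT B =====
-- body of B's 'for j in nums' loop; state = (result, rest-of-missing-iterator, seen)
def solveStepB (st : List Int × List Int × PySem.Set Int) (j : Int) :
    List Int × List Int × PySem.Set Int :=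
  let result := st.1
  let rest := st.2.1
  let seen := st.2.2
  if j ∈ seen then
    -- next(it); the iterator is never exhausted here, the default 0 is unreachable
    (result ++ [rest.headD 0], rest.tail, seen)
  else
    (result ++ [j], rest, PySem.Set.add seen j)

def solve_alt (nums : List Int) : List Int :=
  let n : Int := nums.length
  let present := PySem.Set.ofList nums
  let missing := (PySem.List.pyRange 1 (n + 1) 1).filter
      (fun i => !(PySem.Set.contains present i))
  if missing.isEmpty then nums
  else
    (nums.foldl solveStepB ([], missing, PySem.Set.ofList [])).1

-- ===== PRECONDITION & SPEC =====
def Spec_solve (nums : List Int) (out : List Int) : Prop := out = solve_alt nums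
instance (nums : List Int) (out : List Int) : Decidable (Spec_solve nums out) := by unfold Spec_solve; infer_instance

-- ===== CLAIM (what is proved, stated in full; the proofs are below) =====
def Claim_equal_solve : Prop := ∀ (nums : List Int), Dom_solve nums → Spec_solve nums (solve nums)

-- ===== LEMMAS AND PROOFS =====

-- number of replacement positions the loop will perform on js, starting from seen
def crCount (js : List Int) (s : PySem.Set Int) : Nat :=
  match js with
  | [] => 0
  | j :: t => if j ∈ s then crCount t s + 1 else crCount t (PySem.Set.add s j)

theorem crCount_add_update (js : List Int) (s : PySem.Set Int) :
    crCount js s + (PySem.Set.update s js).length = js.length + s.length := by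
  induction js generalizing s with
  | nil => simp [crCount, PySem.Set.update]
  | cons j t ih =>
    simp only [crCount, PySem.Set.update_cons, List.length_cons]
    by_cases hj : j ∈ s
    · simp [hj]
      have := ih s
      simp [PySem.Set.update] at this ⊢
      omega
    · simp [hj]
      have := ih (PySem.Set.add s j)
      rw [PySem.Set.add_of_not_mem hj] at this
      simp at this ⊢
      omega

theorem foldl_min_of_le (l : List Int) (a : Int) (h : ∀ y ∈ l, a ≤ y) :
    l.foldl min a = a := by
  induction l with
  | nil => rfl
  | cons x t ih =>
    simp only [List.foldl_cons]
    have hx : min a x = a := min_eq_left (h x (by simp))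
    rw [hx]
    exact ih (fun y hy => h y (by simp [hy]))

theorem loop_eq (js : List Int) (res : List Int) (used seen : PySem.Set Int)
    (miss : List Int)
    (hsort : miss.Pairwise (· < ·))
    (hdisj : ∀ j ∈ js, j ∉ miss)
    (hus : ∀ j ∈ js, (j ∈ used ↔ j ∈ seen))
    (hcr : crCount js seen ≤ miss.length) :
    (js.foldl solveStepA (res, used, miss)).1
      = (js.foldl solveStepB (res, miss, seen)).1 := by
  induction js generalizing res used seen miss with
  | nil => rfl
  | cons j t ih =>
    simp only [List.foldl_cons]
    have hjm : j ∉ miss := hdisj j (by simp)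
    by_cases hseen : j ∈ seen
    · -- replacement branch
      have hused : j ∈ used := (hus j (by simp)).mpr hseen
      have hcr' : crCount t seen + 1 ≤ miss.length := by
        simpa [crCount, hseen] using hcr
      obtain ⟨m, rest, rfl⟩ : ∃ m rest, miss = m :: rest := by
        cases miss with
        | nil => simp at hcr'
        | cons m rest => exact ⟨m, rest, rfl⟩
      have hmin : PySem.List.min? (m :: rest) (fun x => x) = some m := by
        rw [PySem.List.min?_id_cons]
        have : rest.foldl min m = m := by
          apply foldl_min_of_le
          intro y hy
          exact le_of_lt ((List.pairwise_cons.mp hsort).1 y hy)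
        rw [this]
      have hA : solveStepA (res, used, m :: rest) j
          = (res ++ [m], PySem.Set.add used m, rest) := by
        simp [solveStepA, hused, hmin, PySem.List.remove?_cons_self]
      have hB : solveStepB (res, m :: rest, seen) j
          = (res ++ [m], rest, seen) := by
        simp [solveStepB, hseen]
      rw [hA, hB]
      apply ih
      · exact (List.pairwise_cons.mp hsort).2
      · intro j' hj'
        have := hdisj j' (by simp [hj'])
        simp at this
        exact this.2
      · intro j' hj'
        have hj'm : j' ≠ m := by
          have := hdisj j' (by simp [hj'])
          simp at this
          exact this.1
        rw [PySem.Set.mem_add]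
        constructor
        · rintro (h | h)
          · exact (hus j' (by simp [hj'])).mp h
          · exact absurd h hj'm
        · intro h
          exact Or.inl ((hus j' (by simp [hj'])).mpr h)
      · simpa using hcr'
    · -- keep branch
      have hused : j ∉ used := fun h => hseen ((hus j (by simp)).mp h)
      have hA : solveStepA (res, used, miss) j
          = (res ++ [j], PySem.Set.add used j, miss) := by
        simp [solveStepA, hused, hjm]
      have hB : solveStepB (res, miss, seen) j
          = (res ++ [j], miss, PySem.Set.add seen j) := by
        simp [solveStepB, hseen]
      rw [hA, hB]
      apply ih
      · exact hsort
      · intro j' hj'; exact hdisj j' (by simp [hj'])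
      · intro j' hj'
        rw [PySem.Set.mem_add, PySem.Set.mem_add]
        constructor
        · rintro (h | h)
          · exact Or.inl ((hus j' (by simp [hj'])).mp h)
          · exact Or.inr h
        · rintro (h | h)
          · exact Or.inl ((hus j' (by simp [hj'])).mpr h)
          · exact Or.inr h
      · simpa [crCount, hseen] using hcr

-- ===== VERDICT (by name: the statement is the Claim_ definition above) =====
theorem length_filter_split (l : List Int) (p : Int → Bool) :
    (l.filter p).length + (l.filter (fun x => !p x)).length = l.length := by
  induction l with
  | nil => rfl
  | cons x t ih =>
    by_cases hx : p x = true
    · simp [hx]; omega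
    · simp only [Bool.not_eq_true] at hx
      simp [hx]; omega

theorem update_eq_foldl (xs : List Int) (s : PySem.Set Int) :
    PySem.Set.update s xs = xs.foldl PySem.Set.add s := by
  induction xs generalizing s with
  | nil => simp [PySem.Set.update_nil]
  | cons x t ih => rw [PySem.Set.update_cons, List.foldl_cons, ih]

theorem contains_ofList_eq (nums : List Int) (x : Int) :
    PySem.Set.contains (PySem.Set.ofList nums) x = decide (x ∈ nums) := by
  by_cases hx : x ∈ nums <;> simp [hx]

theorem solve_spec : Claim_equal_solve := by
  intro nums _
  unfold Spec_solve solve solve_alt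
  dsimp only
  -- the two missing lists are the same list
  have hmiss :
      (PySem.List.pyRange 1 ((nums.length : Int) + 1) 1).foldl
        (fun acc i => if i ∉ nums then acc ++ [i] else acc) []
      = (PySem.List.pyRange 1 ((nums.length : Int) + 1) 1).filter
        (fun i => !(PySem.Set.contains (PySem.Set.ofList nums) i)) := by
    rw [PySem.List.foldl_append_ite_eq_filter]
    simp only [List.nil_append]
    apply List.filter_congr
    intro x _
    rw [contains_ofList_eq]
    by_cases hx : x ∈ nums <;> simp [hx]
  rw [hmiss]
  set M := (PySem.List.pyRange 1 ((nums.length : Int) + 1) 1).filter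
      (fun i => !(PySem.Set.contains (PySem.Set.ofList nums) i)) with hM
  by_cases hE : M.isEmpty
  · simp [hE]
  · simp only [hE, if_false, Bool.false_eq_true]
    apply loop_eq
    · exact (PySem.List.pairwise_lt_pyRange_one 1 ((nums.length : Int) + 1)).sublist
        (List.filter_sublist)
    · intro j hj hjM
      rw [hM, List.mem_filter] at hjM
      have := hjM.2
      rw [contains_ofList_eq] at this
      simp at this
      exact this hj
    · intro j _
      rw [PySem.Set.ofList_nil]
    · -- enough missing values: crCount nums ∅ = n - |set(nums)| ≤ |M|
      have h1 : crCount nums (PySem.Set.ofList [])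
          + (PySem.Set.ofList nums).length = nums.length := by
        have h := crCount_add_update nums (PySem.Set.ofList [])
        rw [update_eq_foldl, PySem.Set.ofList_nil] at h
        rw [← PySem.Set.ofList_eq_foldl] at h
        simpa using h
      have h2 : M.length
          + ((PySem.List.pyRange 1 ((nums.length : Int) + 1) 1).filter
              (fun i => (PySem.Set.contains (PySem.Set.ofList nums) i))).length
          = nums.length := by
        rw [hM]
        have h := length_filter_split (PySem.List.pyRange 1 ((nums.length : Int) + 1) 1)
          (fun i => !(PySem.Set.contains (PySem.Set.ofList nums) i))
        simp only [Bool.not_not] at h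
        rw [h, PySem.List.length_pyRange_one]
        omega
      have h3 : ((PySem.List.pyRange 1 ((nums.length : Int) + 1) 1).filter
              (fun i => (PySem.Set.contains (PySem.Set.ofList nums) i))).length
          ≤ (PySem.Set.ofList nums).length := by
        apply List.Subperm.length_le
        apply List.Nodup.subperm
        · exact (PySem.List.nodup_pyRange_one 1 ((nums.length : Int) + 1)).filter _
        · intro x hx
          rw [List.mem_filter] at hx
          exact (PySem.Set.contains_iff _ _).mp hx.2
      omega
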